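-- pv_equiv track=rewrite | github.com/PaulaGeier/Programacion1 | PARCIAL 2/funciones.py | repeated_dna
-- ===== SOURCE A (Python) =====
-- def repeated_dna(dna_chain):
--     counter=1
--     for i in range(1,len(dna_chain)):
--         if (dna_chain[i]==dna_chain[i-1]) and counter<4:
--             counter+=1 #Si hay secuencias de valores iguales el contador nos dara cuantos valores iguales hay secuencualmente
--         elif counter==4:
--             break
--         else:
--             counter=1
--     return counter
-- ===== SOURCE B (Python) =====
-- def repeated_dna(dna_chain):
--     # Build the run-length encoding once, then decide declaratively:
--     # 4 if any run reaches 4, otherwise the length of the trailing run (1 if empty).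
--     lengths = []
--     cur = None
--     cnt = 0
--     for ch in dna_chain:
--         if cnt and ch == cur:
--             cnt += 1
--         else:
--             if cnt:
--                 lengths.append(cnt)
--             cur, cnt = ch, 1
--     if cnt:
--         lengths.append(cnt)
--     if any(l >= 4 for l in lengths):
--         return 4
--     return lengths[-1] if lengths else 1
-- ===== Notes on version B (the rewrite author's own statement) =====
-- stated objective: alternative
-- what changed: B builds the run-length encoding of the string in one pass and then decides declaratively (return 4 if any run length reaches 4, else the trailing run length, 1 if empty), instead of A's streaming counter state machine with a cap and an early break.
import Mathlib
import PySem

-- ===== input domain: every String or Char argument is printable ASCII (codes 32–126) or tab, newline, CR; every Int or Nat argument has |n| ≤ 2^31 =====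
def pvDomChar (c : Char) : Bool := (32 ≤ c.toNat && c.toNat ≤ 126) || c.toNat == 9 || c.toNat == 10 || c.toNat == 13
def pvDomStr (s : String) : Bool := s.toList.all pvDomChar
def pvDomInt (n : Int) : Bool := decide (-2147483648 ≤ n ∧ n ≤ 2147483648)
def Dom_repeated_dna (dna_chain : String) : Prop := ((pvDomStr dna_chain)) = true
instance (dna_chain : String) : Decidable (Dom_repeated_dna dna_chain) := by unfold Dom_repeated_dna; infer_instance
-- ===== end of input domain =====

-- B replaces A's capped-counter state machine (with early break) by building the
-- run-length encoding once and then deciding declaratively; objective: alternative.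

-- ===== PORT A =====
-- A's loop over i in range(1, len) compares s[i] with s[i-1]; ported as the obvious
-- structural recursion carrying the previous character and the counter (break = return).
def aLoop (prev : Char) (counter : Int) : List Char → Int
  | [] => counter
  | c :: cs =>
    if c == prev ∧ counter < 4 then aLoop c (counter + 1) cs
    else if counter = 4 then counter
    else aLoop c 1 cs

def repeated_dna (dna_chain : String) : Int :=
  match dna_chain.toList with
  | [] => 1
  | c :: cs => aLoop c 1 cs

-- ===== PORT B =====
-- one fold building the run-length encoding: state = (finished run lengths, current char, current run length)
def bStep (st : List Nat × Char × Nat) (ch : Char) : List Nat × Char × Nat :=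
  if st.2.2 ≠ 0 ∧ ch == st.2.1 then (st.1, st.2.1, st.2.2 + 1)
  else ((if st.2.2 ≠ 0 then st.1 ++ [st.2.2] else st.1), ch, 1)

def repeated_dna_alt (dna_chain : String) : Int :=
  let st := dna_chain.toList.foldl bStep ([], ' ', 0)
  let lengths := if st.2.2 ≠ 0 then st.1 ++ [st.2.2] else st.1
  if lengths.any (fun l => 4 ≤ l) then 4
  else ((lengths.getLastD 1 : Nat) : Int)

-- ===== PRECONDITION & SPEC =====
def Spec_repeated_dna (dna_chain : String) (out : Int) : Prop := out = repeated_dna_alt dna_chain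
instance (dna_chain : String) (out : Int) : Decidable (Spec_repeated_dna dna_chain out) := by unfold Spec_repeated_dna; infer_instance

-- ===== CLAIM (what is proved, stated in full; the proofs are below) =====
def Claim_equal_repeated_dna : Prop := ∀ (dna_chain : String), Dom_repeated_dna dna_chain → Spec_repeated_dna dna_chain (repeated_dna dna_chain)

-- ===== LEMMAS AND PROOFS =====

-- proof-side characterisation: the run lengths of a list whose current run (of char c) already has length k
def runsAux (c : Char) (k : Nat) : List Char → List Nat
  | [] => [k]
  | d :: ds => if d == c then runsAux c (k + 1) ds else k :: runsAux d 1 ds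

def bres (L : List Nat) : Int :=
  if L.any (fun l => 4 ≤ l) then 4 else ((L.getLastD 1 : Nat) : Int)

lemma runsAux_ne_nil (cs : List Char) (c : Char) (k : Nat) : runsAux c k cs ≠ [] := by
  cases cs with
  | nil => simp [runsAux]
  | cons d ds => unfold runsAux; split <;> [exact runsAux_ne_nil ds c (k+1); simp]

lemma getLastD_cons_of_ne_nil {R : List Nat} (h : R ≠ []) (x a : Nat) :
    (x :: R).getLastD a = R.getLastD a := by
  cases R with
  | nil => exact absurd rfl h
  | cons y ys => simp

lemma bres_cons_small {k : Nat} (hk : k < 4) {R : List Nat} (hR : R ≠ []) :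
    bres (k :: R) = bres R := by
  unfold bres
  have h4 : ¬ (4 ≤ k) := by omega
  rw [getLastD_cons_of_ne_nil hR k 1]
  simp [List.any_cons, h4]

lemma runsAux_big_any (cs : List Char) (c : Char) (m : Nat) (hm : 4 ≤ m) :
    (runsAux c m cs).any (fun l => 4 ≤ l) = true := by
  induction cs generalizing c m with
  | nil => simp [runsAux]; omega
  | cons d ds ih =>
    unfold runsAux
    split
    · exact ih c (m + 1) (by omega)
    · simp [List.any_cons]; left; omega

lemma bres_big (cs : List Char) (c : Char) (m : Nat) (hm : 4 ≤ m) :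
    bres (runsAux c m cs) = 4 := by
  unfold bres; simp [runsAux_big_any cs c m hm]

-- A's loop computes bres of the run lengths
lemma aLoop_eq_bres (cs : List Char) (c : Char) (k : Nat) (h1 : 1 ≤ k) (h4 : k ≤ 4) :
    aLoop c (k : Int) cs = bres (runsAux c k cs) := by
  induction cs generalizing c k with
  | nil =>
    unfold aLoop runsAux bres
    by_cases hk : 4 ≤ k
    · have : k = 4 := by omega
      subst this; norm_num
    · simp [hk]
  | cons d ds ih =>
    unfold aLoop runsAux
    by_cases hdc : (d == c) = true
    · have hd : d = c := eq_of_beq hdc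
      subst hd
      rw [if_pos hdc]
      by_cases hlt : k < 4
      · rw [if_pos ⟨hdc, by exact_mod_cast hlt⟩]
        have hcast : ((k : Int) + 1) = ((k + 1 : Nat) : Int) := by push_cast; ring
        rw [hcast]
        exact ih d (k + 1) (by omega) (by omega)
      · have hk4 : k = 4 := by omega
        subst hk4
        rw [if_neg (by rintro ⟨_, h⟩; omega), if_pos (by norm_num)]
        rw [bres_big ds d 5 (by omega)]
        norm_num
    · rw [if_neg hdc, if_neg (by rintro ⟨h, _⟩; exact hdc h)]
      by_cases hk4 : k = 4
      · subst hk4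
        rw [if_pos (by norm_num)]
        unfold bres
        simp [List.any_cons]
      · have hklt : k < 4 := by omega
        rw [if_neg (by intro h; exact hk4 (by exact_mod_cast h))]
        rw [bres_cons_small hklt (runsAux_ne_nil ds d 1)]
        exact ih d 1 (by omega) (by omega)

-- B's fold produces the run lengths
lemma foldl_bStep (cs : List Char) (acc : List Nat) (c : Char) (k : Nat) (hk : 0 < k) :
    (let st := cs.foldl bStep (acc, c, k)
     if st.2.2 ≠ 0 then st.1 ++ [st.2.2] else st.1) = acc ++ runsAux c k cs := by
  induction cs generalizing acc c k with
  | nil =>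
    simp only [List.foldl_nil, runsAux]
    rw [if_pos (by omega)]
  | cons d ds ih =>
    simp only [List.foldl_cons]
    unfold runsAux
    by_cases hdc : (d == c) = true
    · have hs : bStep (acc, c, k) d = (acc, c, k + 1) := by
        unfold bStep; rw [if_pos ⟨hk.ne', hdc⟩]
      rw [hs, if_pos hdc]
      exact ih acc c (k + 1) (by omega)
    · have hs : bStep (acc, c, k) d = (acc ++ [k], d, 1) := by
        unfold bStep
        rw [if_neg (by rintro ⟨_, h⟩; exact hdc h)]
        simp only
        rw [if_pos hk.ne']
      rw [hs, if_neg hdc, ih (acc ++ [k]) d 1 (by omega)]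
      simp

-- ===== VERDICT (by name: the statement is the Claim_ definition above) =====
theorem repeated_dna_spec : Claim_equal_repeated_dna := by
  intro s _
  unfold Spec_repeated_dna repeated_dna repeated_dna_alt
  cases hl : s.toList with
  | nil => simp
  | cons c cs =>
    simp only
    have hstep : bStep ([], ' ', 0) c = ([], c, 1) := by
      unfold bStep; rw [if_neg (by rintro ⟨h, _⟩; exact h rfl)]; simp
    rw [List.foldl_cons, hstep]
    have hfold := foldl_bStep cs ([] : List Nat) c 1 (by omega)
    simp only at hfold
    rw [hfold]
    simp only [List.nil_append]
    have := aLoop_eq_bres cs c 1 (by omega) (by omega)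
    simpa [bres] using this
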